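-- pv_equiv track=rewrite | github.com/zarrock256/python | numbersGenerator.py | almostSorted
-- ===== SOURCE A (Python) =====
-- def almostSorted(n):        #(b)
--     tab = []
--     for i in range(n):
--         tab.append(i)
--     for i in range(0, n, 2):
--         if i < n-1:
--             temp = tab[i]
--             tab[i] = tab[i+1]
--             tab[i+1] = temp
--     return tab
-- ===== SOURCE B (Python) =====
-- def almostSorted(n):
--     # single pass: each element computed directly from its index (no build-then-swap)
--     return [i + 1 if i % 2 == 0 and i + 1 < n else (i - 1 if i % 2 == 1 else i)
--             for i in range(n)]
-- ===== Notes on version B (the rewrite author's own statement) =====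
-- stated objective: simpler
-- what changed: B emits each element directly from its index in one comprehension (i+1 / i-1 / i by parity and the odd-length tail) instead of A's two passes that build the identity list and then swap pairs in place.
import Mathlib
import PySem

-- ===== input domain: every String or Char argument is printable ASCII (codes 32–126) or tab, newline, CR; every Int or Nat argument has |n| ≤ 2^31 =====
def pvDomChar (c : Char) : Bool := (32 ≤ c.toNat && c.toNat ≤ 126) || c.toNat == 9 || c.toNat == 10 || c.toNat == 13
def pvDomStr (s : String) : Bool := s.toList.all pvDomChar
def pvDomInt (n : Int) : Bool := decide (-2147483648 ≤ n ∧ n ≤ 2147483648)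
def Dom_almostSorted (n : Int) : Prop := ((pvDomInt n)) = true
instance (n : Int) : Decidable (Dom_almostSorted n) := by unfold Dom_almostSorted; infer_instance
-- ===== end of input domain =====

-- B rewrites A's build-then-swap as a single closed-form pass over the indices (objective: simpler).

-- ===== PORT A =====
-- indices i and i+1 are read/written only under the guard i < n-1, where they are in range,
-- so the total forms pyGetD/pySetD are exact here
def almostSorted (n : Int) : List Int :=
  let tab : List Int := (PySem.List.pyRange 0 n 1).foldl (fun tab i => tab ++ [i]) []
  (PySem.List.pyRange 0 n 2).foldl (fun tab i =>
    if i < n - 1 then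
      let temp := PySem.List.pyGetD tab i 0
      let tab1 := PySem.List.pySetD tab i (PySem.List.pyGetD tab (i + 1) 0)
      PySem.List.pySetD tab1 (i + 1) temp
    else tab) tab

-- ===== PORT B =====
def almostSorted_alt (n : Int) : List Int :=
  (PySem.List.pyRange 0 n 1).map (fun i =>
    if PySem.Int.mod i 2 = 0 ∧ i + 1 < n then i + 1
    else if PySem.Int.mod i 2 = 1 then i - 1
    else i)

-- ===== PRECONDITION & SPEC =====
def Spec_almostSorted (n : Int) (out : List Int) : Prop := out = almostSorted_alt n
instance (n : Int) (out : List Int) : Decidable (Spec_almostSorted n out) := by unfold Spec_almostSorted; infer_instance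

-- ===== CLAIM (what is proved, stated in full; the proofs are below) =====
def Claim_equal_almostSorted : Prop := ∀ (n : Int), Dom_almostSorted n → Spec_almostSorted n (almostSorted n)

-- ===== LEMMAS AND PROOFS =====

-- the swap-loop body of port A, named for the proofs
def swStep (n : Int) (tab : List Int) (i : Int) : List Int :=
  if i < n - 1 then
    let temp := PySem.List.pyGetD tab i 0
    let tab1 := PySem.List.pySetD tab i (PySem.List.pyGetD tab (i + 1) 0)
    PySem.List.pySetD tab1 (i + 1) temp
  else tab

-- the value B computes at index j of an m-element list, in Nat form
def gVal (m j : Nat) : Int :=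
  if j % 2 = 0 then (if j + 1 < m then (j : Int) + 1 else (j : Int)) else (j : Int) - 1

-- the state of A's swap loop after k iterations
def stateS (m k : Nat) : List Int :=
  (List.range m).map (fun j => if j < 2 * k then gVal m j else (j : Int))

theorem stateS_getD (m k j : Nat) (hj : j < m) :
    (stateS m k).getD j 0 = if j < 2 * k then gVal m j else (j : Int) := by
  rw [List.getD_eq_getElem _ _ (by simp [stateS]; omega)]
  simp [stateS]

theorem swStep_state (m k : Nat) (hk : 2 * k + 1 ≤ m) :
    swStep (m : Int) (stateS m k) ((0 : Int) + 2 * (k : Nat)) = stateS m (k + 1) := by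
  have hidx : ((0 : Int) + 2 * ((k : Nat) : Int)) = ((2 * k : Nat) : Int) := by push_cast; ring
  unfold swStep
  rw [hidx]
  by_cases h2 : 2 * k + 1 < m
  · rw [if_pos (by push_cast; omega)]
    have hcast : ((2 * k : Nat) : Int) + 1 = ((2 * k + 1 : Nat) : Int) := by push_cast; ring
    rw [hcast, PySem.List.pyGetD_natCast, PySem.List.pyGetD_natCast,
      PySem.List.pySetD_natCast, PySem.List.pySetD_natCast]
    rw [stateS_getD m k (2 * k) (by omega), stateS_getD m k (2 * k + 1) (by omega),
      if_neg (by omega), if_neg (by omega)]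
    apply List.ext_getElem
    · simp [stateS]
    · intro j hj1 hj2
      simp only [List.getElem_set]
      simp only [stateS, List.getElem_map, List.getElem_range]
      have hjm : j < m := by simpa [stateS] using hj2
      by_cases e1 : 2 * k + 1 = j
      · rw [if_pos e1, if_pos (by omega)]
        subst e1
        unfold gVal
        rw [if_neg (by omega)]
        push_cast; ring
      · rw [if_neg e1]
        by_cases e2 : 2 * k = j
        · rw [if_pos e2, if_pos (by omega)]
          subst e2
          unfold gVal
          rw [if_pos (by omega), if_pos (by omega)]
          push_cast; ring
        · rw [if_neg e2]
          by_cases e3 : j < 2 * k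
          · rw [if_pos e3, if_pos (show j < 2 * (k + 1) by omega)]
          · rw [if_neg e3, if_neg (show ¬ j < 2 * (k + 1) by omega)]
  · -- here 2 * k + 1 = m : the guard i < n - 1 is false and the state is already final
    rw [if_neg (by push_cast; omega)]
    unfold stateS
    apply List.map_congr_left
    intro j hj
    rw [List.mem_range] at hj
    by_cases e3 : j < 2 * k
    · rw [if_pos e3, if_pos (by omega)]
    · have hje : j = 2 * k := by omega
      subst hje
      rw [if_neg e3, if_pos (by omega)]
      unfold gVal
      rw [if_pos (by omega), if_neg (by omega)]

theorem inv_fold (m : Nat) (k : Nat) (hk : k ≤ (m + 1) / 2) :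
    (List.map (fun j : Nat => (0 : Int) + 2 * (j : Int)) (List.range k)).foldl (swStep (m : Int)) (stateS m 0)
      = stateS m k := by
  induction k with
  | zero => simp
  | succ k ih =>
    rw [List.range_succ, List.map_append, List.foldl_append, ih (by omega)]
    simpa using swStep_state m k (by omega)

theorem almostSorted_nat (m : Nat) : almostSorted (m : Int) = almostSorted_alt (m : Int) := by
  unfold almostSorted
  rw [PySem.List.foldl_append_singleton_eq_self]
  have h0 : ([] : List Int) ++ PySem.List.pyRange 0 (m : Int) 1 = stateS m 0 := by
    simp [stateS, PySem.List.pyRange_zero_natCast]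
  have h2 : PySem.List.pyRange 0 (m : Int) 2
      = List.map (fun j : Nat => (0 : Int) + 2 * (j : Int)) (List.range ((m + 1) / 2)) := by
    have hcnt : (if (0 : Int) < (m : Int) then (((m : Int) - 0 + 2 - 1) / 2).toNat else 0)
        = (m + 1) / 2 := by split_ifs with hm <;> omega
    rw [PySem.List.pyRange_of_pos 0 (m : Int) (by norm_num), hcnt]
  have hfold := inv_fold m ((m + 1) / 2) le_rfl
  rw [h0, h2]
  have hstep : (fun (tab : List Int) (i : Int) =>
      if i < (m : Int) - 1 then
        let temp := PySem.List.pyGetD tab i 0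
        let tab1 := PySem.List.pySetD tab i (PySem.List.pyGetD tab (i + 1) 0)
        PySem.List.pySetD tab1 (i + 1) temp
      else tab) = swStep (m : Int) := rfl
  rw [hstep, hfold]
  unfold almostSorted_alt stateS
  rw [PySem.List.pyRange_zero_natCast, List.map_map]
  apply List.map_congr_left
  intro j hj
  rw [List.mem_range] at hj
  simp only [Function.comp_apply]
  rw [if_pos (by omega)]
  have hmod : PySem.Int.mod ((j : Nat) : Int) 2 = ((j % 2 : Nat) : Int) :=
    PySem.Int.mod_natCast j 2
  rw [hmod]
  unfold gVal
  split_ifs <;> omega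

-- ===== VERDICT (by name: the statement is the Claim_ definition above) =====
theorem almostSorted_spec : Claim_equal_almostSorted := by
  intro n _
  unfold Spec_almostSorted
  by_cases hn : 0 ≤ n
  · obtain ⟨m, rfl⟩ : ∃ m : Nat, n = (m : Int) := ⟨n.toNat, (Int.toNat_of_nonneg hn).symm⟩
    exact almostSorted_nat m
  · have h1 : PySem.List.pyRange 0 n 1 = [] := PySem.List.pyRange_one_eq_nil (by omega)
    simp [almostSorted, almostSorted_alt, h1,
      PySem.List.pyRange_of_pos (a := 0) (b := n) (s := 2) (by norm_num), show ¬ (0 : Int) < n by omega]
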